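-- pv_equiv track=rewrite | github.com/aloix123/Korepetycje | lekcje/zad1.py | find_first_even
-- ===== SOURCE A (Python) =====
-- def find_first_even(A):
--     leftindex=0;rightindex=len(A)-1
--     while leftindex<=rightindex:
--         middle=(leftindex+rightindex)//2
--         if A[middle]%2==0:
--             rightindex=middle-1
--         else:
--             leftindex=middle+1
--     return A[leftindex]
-- ===== SOURCE B (Python) =====
-- def find_first_even(A):
--     # divide-and-conquer on (offset, segment length) instead of a (lo, hi) while-loop
--     def go(lo, g):
--         if g == 0:
--             return A[lo]
--         h = (g - 1) // 2
--         m = lo + h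
--         if A[m] % 2 == 0:
--             return go(lo, h)
--         return go(m + 1, g // 2)
--     return go(0, len(A))
-- ===== Notes on version B (the rewrite author's own statement) =====
-- stated objective: alternative
-- what changed: The iterative while-loop maintaining mutable (leftindex, rightindex) bounds is replaced by a divide-and-conquer recursion go(offset, segment_length) that halves the segment length; same binary-search probe sequence, different control structure and state representation.
import Mathlib
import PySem

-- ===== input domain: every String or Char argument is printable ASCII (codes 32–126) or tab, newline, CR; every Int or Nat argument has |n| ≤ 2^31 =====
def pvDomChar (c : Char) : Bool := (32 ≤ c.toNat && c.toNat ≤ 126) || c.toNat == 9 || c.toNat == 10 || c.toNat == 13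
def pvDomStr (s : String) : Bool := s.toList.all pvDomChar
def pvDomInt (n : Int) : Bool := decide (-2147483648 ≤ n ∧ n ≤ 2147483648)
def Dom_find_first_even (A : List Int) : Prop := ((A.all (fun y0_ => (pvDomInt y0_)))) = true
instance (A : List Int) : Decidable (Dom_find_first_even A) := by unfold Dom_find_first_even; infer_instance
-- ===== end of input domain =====

-- B replaces A's while-loop over mutable (lo, hi) bounds by a divide-and-conquer
-- recursion on (offset, segment length); same probe sequence, different control structure.

-- ===== PORT A =====
-- literal port of A's while-loop: state (leftindex, rightindex), terminal read A[leftindex]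
def ffeLoop (A : List Int) (leftindex rightindex : Int) : Int :=
  if _h : leftindex ≤ rightindex then
    have hmid := PySem.Int.floordiv_two_mid_bounds _h
    if PySem.Int.mod (PySem.List.pyGetD A (PySem.Int.floordiv (leftindex + rightindex) 2) 0) 2 = 0 then
      ffeLoop A leftindex (PySem.Int.floordiv (leftindex + rightindex) 2 - 1)
    else
      ffeLoop A (PySem.Int.floordiv (leftindex + rightindex) 2 + 1) rightindex
  else
    PySem.List.pyGetD A leftindex 0
termination_by (rightindex + 1 - leftindex).toNat
decreasing_by all_goals omega

def find_first_even (A : List Int) : Int :=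
  ffeLoop A 0 ((A.length : Int) - 1)

-- ===== PORT B =====
-- literal port of Source B's go(lo, g): recursion halving the segment length g
def ffeGo (A : List Int) (lo : Int) (g : Nat) : Int :=
  if _hg : g = 0 then
    PySem.List.pyGetD A lo 0
  else
    if PySem.Int.mod (PySem.List.pyGetD A (lo + (((g - 1) / 2 : Nat) : Int)) 0) 2 = 0 then
      ffeGo A lo ((g - 1) / 2)
    else
      ffeGo A (lo + (((g - 1) / 2 : Nat) : Int) + 1) (g / 2)
termination_by g
decreasing_by all_goals omega

def find_first_even_alt (A : List Int) : Int :=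
  ffeGo A 0 A.length

-- ===== PRECONDITION & SPEC =====
-- Pre_ excludes exactly the inputs on which Python A raises IndexError (the final
-- A[leftindex] read with leftindex = len(A)): that happens iff A is empty or every
-- element on the rightmost probe chain (indices n-1-n/2^(k+1)) is odd.
def Pre_find_first_even (A : List Int) : Prop :=
  A ≠ [] ∧ ∃ k < A.length,
    PySem.Int.mod (A.getD (A.length - 1 - A.length / 2 ^ (k + 1)) 0) 2 = 0
instance (A : List Int) : Decidable (Pre_find_first_even A) := by
  unfold Pre_find_first_even; infer_instance

def pvWitness_find_first_even : List Int := [1, 2]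

def Spec_find_first_even (A : List Int) (out : Int) : Prop := out = find_first_even_alt A
instance (A : List Int) (out : Int) : Decidable (Spec_find_first_even A out) := by
  unfold Spec_find_first_even; infer_instance

-- ===== CLAIM (what is proved, stated in full; the proofs are below) =====
def Claim_equal_find_first_even : Prop :=
  ∀ (A : List Int), Dom_find_first_even A → Pre_find_first_even A →
    Spec_find_first_even A (find_first_even A)

-- ===== LEMMAS AND PROOFS =====

-- loop ≡ divide-and-conquer: the loop from (lo, hi) computes go at segment length (hi+1-lo).toNat
theorem ffeLoop_eq_ffeGo (A : List Int) (g : Nat) :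
    ∀ (lo hi : Int), (hi + 1 - lo).toNat = g → ffeLoop A lo hi = ffeGo A lo g := by
  induction g using Nat.strong_induction_on with
  | _ g ih =>
    intro lo hi hg
    rw [ffeLoop]
    by_cases hle : lo ≤ hi
    · have hg1 : g ≠ 0 := by omega
      have hmid : PySem.Int.floordiv (lo + hi) 2 = lo + (((g - 1) / 2 : Nat) : Int) := by
        rw [PySem.Int.floordiv_eq_ediv_of_pos (by omega)]; omega
      rw [ffeGo]
      simp only [hle, hg1, dif_pos, dif_neg, not_false_iff, hmid]
      split
      · exact ih ((g - 1) / 2) (by omega) lo (lo + (((g - 1) / 2 : Nat) : Int) - 1) (by omega)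
      · exact ih (g / 2) (by omega) (lo + (((g - 1) / 2 : Nat) : Int) + 1) hi (by omega)
    · have hg0 : g = 0 := by omega
      rw [ffeGo]
      simp [hle, hg0]

-- ===== VERDICT (by name: the statement is the Claim_ definition above) =====
theorem find_first_even_spec : Claim_equal_find_first_even := by
  intro A _ _
  unfold Spec_find_first_even find_first_even find_first_even_alt
  exact ffeLoop_eq_ffeGo A A.length 0 ((A.length : Int) - 1) (by omega)
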